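-- pv_equiv track=rewrite | github.com/PyRigi/PyRigi | doc/sort_release_notes.py | categorize_prs
-- ===== SOURCE A (Python) =====
-- from collections import defaultdict
--
-- user_categories = {
--     "Feature:": "New features",
--     "Update:": "Updates",
--     "Fix:": "Bug fixes",
--     "Doc:": "Documentation",
-- }
--
-- developer_categories = {
--     "Test:": "Testing",
--     "Setup:": "Technical setup",
--     "Code:": "Code changes",
--     "Guide:": "Development guide",
--     "Minor:": "Minor changes",
-- }
--
-- def categorize_prs(pr_list):
--     # Dictionaries to hold categorized PRs
--     user_prs = defaultdict(list)
--     developer_prs = defaultdict(list)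
--     unsorted_prs = []
--
--     for prefix, title, author, pr_number, url in pr_list:
--         if prefix in user_categories:
--             user_prs[user_categories[prefix]].append((pr_number, title, url, author))
--         elif prefix in developer_categories:
--             developer_prs[developer_categories[prefix]].append(
--                 (pr_number, title, url, author)
--             )
--         else:
--             unsorted_prs.append(
--                 (pr_number, prefix, title, url, author)
--             )  # Collect unsorted PRs
--
--     # Sort by PR number within each category
--     for category in user_prs:
--         user_prs[category].sort()
--
--     for category in developer_prs:
--         developer_prs[category].sort()
--
--     # Sort unsorted PRs by their PR number
--     unsorted_prs.sort()
--
--     return user_prs, developer_prs, unsorted_prs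
-- ===== SOURCE B (Python) =====
-- user_categories = {
--     "Feature:": "New features",
--     "Update:": "Updates",
--     "Fix:": "Bug fixes",
--     "Doc:": "Documentation",
-- }
--
-- developer_categories = {
--     "Test:": "Testing",
--     "Setup:": "Technical setup",
--     "Code:": "Code changes",
--     "Guide:": "Development guide",
--     "Minor:": "Minor changes",
-- }
--
--
-- def _group_sorted(rows):
--     """Group (category, entry) pairs into a dict: categories in
--     first-appearance order, each category's entries sorted."""
--     return {
--         cat: sorted(entry for c, entry in rows if c == cat)
--         for cat in dict.fromkeys(c for c, _ in rows)
--     }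
--
--
-- def categorize_prs(pr_list):
--     user_rows = [
--         (user_categories[prefix], (pr_number, title, url, author))
--         for prefix, title, author, pr_number, url in pr_list
--         if prefix in user_categories
--     ]
--     developer_rows = [
--         (developer_categories[prefix], (pr_number, title, url, author))
--         for prefix, title, author, pr_number, url in pr_list
--         if prefix in developer_categories
--     ]
--     unsorted_prs = sorted(
--         (pr_number, prefix, title, url, author)
--         for prefix, title, author, pr_number, url in pr_list
--         if prefix not in user_categories and prefix not in developer_categories
--     )
--     return _group_sorted(user_rows), _group_sorted(developer_rows), unsorted_prs
-- ===== Notes on version B (the rewrite author's own statement) =====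
-- stated objective: alternative
-- what changed: A classifies with one mutating loop over defaultdicts and then sorts each bucket in place; B instead builds three filtered comprehensions (user rows, developer rows, leftover tuples) and groups each tagged list with a declarative helper (dict.fromkeys for category order, a dict comprehension with sorted() per category), with no mutation and no defaultdict.
import Mathlib
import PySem

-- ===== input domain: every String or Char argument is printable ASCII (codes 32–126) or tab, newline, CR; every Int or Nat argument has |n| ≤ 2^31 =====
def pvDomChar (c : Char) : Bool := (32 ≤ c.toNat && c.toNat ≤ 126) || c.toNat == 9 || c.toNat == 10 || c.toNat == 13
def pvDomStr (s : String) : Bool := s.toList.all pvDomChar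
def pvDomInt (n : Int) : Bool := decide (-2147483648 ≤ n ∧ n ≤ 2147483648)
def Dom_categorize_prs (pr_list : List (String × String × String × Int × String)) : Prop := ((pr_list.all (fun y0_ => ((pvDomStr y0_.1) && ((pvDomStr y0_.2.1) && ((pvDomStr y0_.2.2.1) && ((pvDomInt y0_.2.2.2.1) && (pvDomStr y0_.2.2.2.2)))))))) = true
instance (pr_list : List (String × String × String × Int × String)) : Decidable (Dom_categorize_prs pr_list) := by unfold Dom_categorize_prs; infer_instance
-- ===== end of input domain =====

-- B replaces A's mutating defaultdict loop + per-bucket in-place .sort() by three filtered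
-- comprehensions and a declarative grouping helper (dict.fromkeys + dict comprehension with
-- sorted()); objective: alternative decomposition, same result.

abbrev PVRow := String × String × String × Int × String
abbrev PVT4 := Int × String × String × String
abbrev PVT5 := Int × String × String × String × String

-- module-level constants shared by both Pythons
def pvUserCats : PySem.Dict String String := PySem.Dict.ofList
  [("Feature:", "New features"), ("Update:", "Updates"), ("Fix:", "Bug fixes"), ("Doc:", "Documentation")]
def pvDevCats : PySem.Dict String String := PySem.Dict.ofList
  [("Test:", "Testing"), ("Setup:", "Technical setup"), ("Code:", "Code changes"),
   ("Guide:", "Development guide"), ("Minor:", "Minor changes")]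

-- Python tuple comparison = lexicographic order, modelled with Lex
def pvKey4 (t : PVT4) : Lex (Int × Lex (String × Lex (String × String))) :=
  toLex (t.1, toLex (t.2.1, toLex (t.2.2.1, t.2.2.2)))
def pvKey5 (t : PVT5) : Lex (Int × Lex (String × Lex (String × Lex (String × String)))) :=
  toLex (t.1, toLex (t.2.1, toLex (t.2.2.1, toLex (t.2.2.2.1, t.2.2.2.2))))

-- ===== PORT A =====
-- the body of A's single categorizing loop
def pvStepA (st : PySem.Dict String (List PVT4) × PySem.Dict String (List PVT4) × List PVT5)
    (r : PVRow) : PySem.Dict String (List PVT4) × PySem.Dict String (List PVT4) × List PVT5 :=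
  match r with
  | (pfx, title, author, num, url) =>
    if pvUserCats.contains pfx then
      (st.1.modify (pvUserCats.getD pfx "") [] (fun v => v ++ [(num, title, url, author)]), st.2.1, st.2.2)
    else if pvDevCats.contains pfx then
      (st.1, st.2.1.modify (pvDevCats.getD pfx "") [] (fun v => v ++ [(num, title, url, author)]), st.2.2)
    else
      (st.1, st.2.1, st.2.2 ++ [(num, pfx, title, url, author)])

def categorize_prs (pr_list : List (String × String × String × Int × String)) :
    (List (String × List (Int × String × String × String))) × (List (String × List (Int × String × String × String))) × (List (Int × String × String × String × String)) :=
  -- the loop, then the per-category in-place .sort() (dict order unchanged), then unsorted_prs.sort()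
  ((pr_list.foldl pvStepA (PySem.Dict.empty, PySem.Dict.empty, [])).1.items.map
      (fun kv => (kv.1, PySem.List.sorted kv.2 pvKey4)),
   (pr_list.foldl pvStepA (PySem.Dict.empty, PySem.Dict.empty, [])).2.1.items.map
      (fun kv => (kv.1, PySem.List.sorted kv.2 pvKey4)),
   PySem.List.sorted (pr_list.foldl pvStepA (PySem.Dict.empty, PySem.Dict.empty, [])).2.2 pvKey5)

-- ===== PORT B =====
-- the three filtered comprehensions (user_rows / developer_rows / the unsorted generator)
def pvRowUB (r : PVRow) : Option (String × PVT4) :=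
  if pvUserCats.contains r.1 then some (pvUserCats.getD r.1 "", (r.2.2.2.1, r.2.1, r.2.2.2.2, r.2.2.1))
  else none
def pvRowDB (r : PVRow) : Option (String × PVT4) :=
  if pvDevCats.contains r.1 then some (pvDevCats.getD r.1 "", (r.2.2.2.1, r.2.1, r.2.2.2.2, r.2.2.1))
  else none
def pvRowSB (r : PVRow) : Option PVT5 :=
  if !pvUserCats.contains r.1 && !pvDevCats.contains r.1 then
    some (r.2.2.2.1, r.1, r.2.1, r.2.2.2.2, r.2.2.1)
  else none

-- _group_sorted: dict.fromkeys = PySem.List.dedup; the dict comprehension iterates these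
-- (distinct) keys in order, so the resulting dict's items are exactly this map
def pvGroupSorted (rows : List (String × PVT4)) : List (String × List PVT4) :=
  (PySem.List.dedup (rows.map (·.1))).map
    (fun cat => (cat, PySem.List.sorted ((rows.filter (fun p => p.1 == cat)).map (·.2)) pvKey4))

def categorize_prs_alt (pr_list : List (String × String × String × Int × String)) :
    (List (String × List (Int × String × String × String))) × (List (String × List (Int × String × String × String))) × (List (Int × String × String × String × String)) :=
  (pvGroupSorted (pr_list.filterMap pvRowUB),
   pvGroupSorted (pr_list.filterMap pvRowDB),
   PySem.List.sorted (pr_list.filterMap pvRowSB) pvKey5)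

-- ===== PRECONDITION & SPEC =====
def Spec_categorize_prs (pr_list : List (String × String × String × Int × String)) (out : (List (String × List (Int × String × String × String))) × (List (String × List (Int × String × String × String))) × (List (Int × String × String × String × String))) : Prop := out = categorize_prs_alt pr_list
instance (pr_list : List (String × String × String × Int × String)) (out : (List (String × List (Int × String × String × String))) × (List (String × List (Int × String × String × String))) × (List (Int × String × String × String × String))) : Decidable (Spec_categorize_prs pr_list out) := by
  unfold Spec_categorize_prs
  haveI i1 : DecidableEq (Int × String × String × String) := inferInstance
  haveI i2 : DecidableEq (List (Int × String × String × String)) := instDecidableEqList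
  haveI i3 : DecidableEq (String × List (Int × String × String × String)) := instDecidableEqProd
  haveI i4 : DecidableEq (List (String × List (Int × String × String × String))) := instDecidableEqList
  haveI i5 : DecidableEq (Int × String × String × String × String) := inferInstance
  haveI i6 : DecidableEq (List (Int × String × String × String × String)) := instDecidableEqList
  haveI i7 : DecidableEq ((List (String × List (Int × String × String × String))) × (List (Int × String × String × String × String))) := instDecidableEqProd
  haveI i8 : DecidableEq ((List (String × List (Int × String × String × String))) × (List (String × List (Int × String × String × String))) × (List (Int × String × String × String × String))) := instDecidableEqProd
  exact i8 _ _

-- ===== CLAIM (what is proved, stated in full; the proofs are below) =====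
def Claim_equal_categorize_prs : Prop := ∀ (pr_list : List (String × String × String × Int × String)), Dom_categorize_prs pr_list → Spec_categorize_prs pr_list (categorize_prs pr_list)

-- ===== LEMMAS AND PROOFS =====

-- A's branch conditions re-expressed as row classifiers (user first, then developer, else unsorted)
def pvRowU (r : PVRow) : Option (String × PVT4) :=
  if pvUserCats.contains r.1 then some (pvUserCats.getD r.1 "", (r.2.2.2.1, r.2.1, r.2.2.2.2, r.2.2.1))
  else none
def pvRowD (r : PVRow) : Option (String × PVT4) :=
  if pvUserCats.contains r.1 then none
  else if pvDevCats.contains r.1 then some (pvDevCats.getD r.1 "", (r.2.2.2.1, r.2.1, r.2.2.2.2, r.2.2.1))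
  else none

-- the two category tables have disjoint key sets
theorem pv_disjoint (s : String) (h : pvUserCats.contains s = true) :
    pvDevCats.contains s = false := by
  have hmk : pvUserCats = PySem.Dict.mk
      [("Feature:", "New features"), ("Update:", "Updates"), ("Fix:", "Bug fixes"), ("Doc:", "Documentation")] := by
    decide
  have hs : s = "Feature:" ∨ s = "Update:" ∨ s = "Fix:" ∨ s = "Doc:" := by
    rw [hmk, PySem.Dict.contains_mk] at h
    simp only [List.any_cons, List.any_nil, Bool.or_eq_true, beq_iff_eq, Bool.false_eq_true,
      or_false] at h
    tauto
  rcases hs with h | h | h | h <;> subst h <;> decide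

theorem pvRowDB_eq : pvRowDB = pvRowD := by
  funext r
  by_cases hu : pvUserCats.contains r.1 = true
  · simp [pvRowDB, pvRowD, hu, pv_disjoint r.1 hu]
  · simp [pvRowDB, pvRowD, hu]

-- the single loop of A splits into three independent folds
theorem pv_foldA_split (l : List PVRow)
    (u d : PySem.Dict String (List PVT4)) (s : List PVT5) :
    l.foldl pvStepA (u, d, s) =
      ((l.filterMap pvRowU).foldl (fun d p => d.modify p.1 [] (fun v => v ++ [p.2])) u,
       (l.filterMap pvRowD).foldl (fun d p => d.modify p.1 [] (fun v => v ++ [p.2])) d,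
       s ++ l.filterMap pvRowSB) := by
  induction l generalizing u d s with
  | nil => simp
  | cons r t ih =>
    obtain ⟨pfx, title, author, num, url⟩ := r
    by_cases h1 : pvUserCats.contains pfx = true
    · have hu : pvRowU (pfx, title, author, num, url)
          = some (pvUserCats.getD pfx "", (num, title, url, author)) := by
        simp [pvRowU, h1]
      have hd : pvRowD (pfx, title, author, num, url) = none := by simp [pvRowD, h1]
      have hs : pvRowSB (pfx, title, author, num, url) = none := by simp [pvRowSB, h1]
      simp only [List.foldl_cons, pvStepA, List.filterMap_cons, hu, hd, hs]
      rw [if_pos h1]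
      simp [ih]
    · by_cases h2 : pvDevCats.contains pfx = true
      · have hu : pvRowU (pfx, title, author, num, url) = none := by simp [pvRowU, h1]
        have hd : pvRowD (pfx, title, author, num, url)
            = some (pvDevCats.getD pfx "", (num, title, url, author)) := by
          simp [pvRowD, h1, h2]
        have hs : pvRowSB (pfx, title, author, num, url) = none := by simp [pvRowSB, h1, h2]
        simp only [List.foldl_cons, pvStepA, List.filterMap_cons, hu, hd, hs]
        rw [if_neg h1, if_pos h2]
        simp [ih]
      · have hu : pvRowU (pfx, title, author, num, url) = none := by simp [pvRowU, h1]
        have hd : pvRowD (pfx, title, author, num, url) = none := by simp [pvRowD, h1, h2]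
        have hs : pvRowSB (pfx, title, author, num, url)
            = some (num, pfx, title, url, author) := by simp [pvRowSB, h1, h2]
        simp only [List.foldl_cons, pvStepA, List.filterMap_cons, hu, hd, hs]
        rw [if_neg h1, if_neg h2]
        simp [ih]

-- one dict component of A (fold from empty, then sort each bucket) = pvGroupSorted of its rows
theorem pv_side (rows : List (String × PVT4)) :
    ((rows.foldl (fun d p => d.modify p.1 [] (fun v => v ++ [p.2])) PySem.Dict.empty).items.map
        (fun kv => (kv.1, PySem.List.sorted kv.2 pvKey4))) = pvGroupSorted rows := by
  have hnd : ((rows.foldl (fun d p => d.modify p.1 [] (fun v => v ++ [p.2])) PySem.Dict.empty)).keys.Nodup :=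
    PySem.Dict.nodup_keys_foldl_modify_key (l := rows) (key := fun p => p.1)
      (d0 := []) (f := fun _ p v => v ++ [p.2]) (d := PySem.Dict.empty) (by simp)
  have hk : ((rows.foldl (fun d p => d.modify p.1 [] (fun v => v ++ [p.2])) PySem.Dict.empty)).keys
      = PySem.Set.update (PySem.Dict.empty : PySem.Dict String (List PVT4)).keys (rows.map (·.1)) :=
    PySem.Dict.keys_foldl_modify_key (l := rows) (key := fun p => p.1)
      (d0 := []) (f := fun _ p v => v ++ [p.2]) (d := PySem.Dict.empty)
  have hk2 : PySem.Set.update (PySem.Dict.empty : PySem.Dict String (List PVT4)).keys (rows.map (·.1))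
      = PySem.List.dedup (rows.map (·.1)) := by
    rw [PySem.Set.update_eq_append_filter]
    simp [PySem.Dict.empty, PySem.Dict.keys, PySem.Set.contains]
  rw [PySem.Dict.items_eq_map_keys _ hnd [], hk, hk2, List.map_map, pvGroupSorted]
  apply List.map_congr_left
  intro k _
  simp only [Function.comp_apply]
  rw [PySem.Dict.getD_foldl_modify_append]
  simp [PySem.Dict.getD_empty]

-- ===== VERDICT (by name: the statement is the Claim_ definition above) =====
theorem categorize_prs_spec : Claim_equal_categorize_prs := by
  intro pr_list _
  unfold Spec_categorize_prs categorize_prs categorize_prs_alt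
  rw [pv_foldA_split, pvRowDB_eq]
  have hUB : pvRowUB = pvRowU := rfl
  simp only [Prod.mk.injEq, List.nil_append]
  exact ⟨by rw [hUB]; exact pv_side _, pv_side _, trivial⟩
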